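-- pv_equiv track=rewrite | github.com/rdh1896/CS1-Assignments | hw04/double_add_5.py | find_start_iter
-- ===== SOURCE A (Python) =====
-- def find_end_iter(start, count):
--     """
--     Takes a value (start) and continuously doubles it then
--     adds 5 until the sequence has repeated itself (count)
--     times. Done iteratively, is fruitful. Only returns the last
--     term in the sequence or itself.
--     Pre-Conditions: (start) and (count) should be positive to
--     expect a correct outcome.
--     :param start: Starting number the sequence will begin from.
--     :param count: Amount of times the sequence will repeat.
--     :return: start
--     """
--     while count >= 0:
--         start = (start * 2) + 5
--         count = count - 1
--         if count == 0:
--             return start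
--
-- def find_start_iter(goal, count):
--     """
--     Takes a value (goal) and then begins with the start value 0
--     and attempts to count up (count) times from 0 (adding 1
--     incrementally to the start variable each time it fails to meet (goal))
--     until the (goal) has been met or surpassed.
--     Function is created iteratively and is fruitful. Only returns
--     the correct start value or itself.
--     Pre-Conditions: (start), (count), and (goal) should be positive to
--     expect a correct outcome.
--     :param count: Amount of times the sequence will repeat.
--     :param goal: Target number the function tries to count to.
--     :return: start
--     """
--     start = 0
--     value = 0
--     while goal > value:
--         value = find_end_iter(start, count)
--         if value >= goal:
--                 return start
--         else:
--             start = start + 1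
-- ===== SOURCE B (Python) =====
-- def find_start_iter(goal, count):
--     # B: doubling the affine offset/coefficient of start -> (2^k)*start + 5*(2^k-1),
--     # with early exit once start 0 already reaches goal; O(min(count, log goal)).
--     off = 0
--     p = 1
--     for _ in range(count):
--         off = 2 * off + 5
--         p *= 2
--         if off >= goal:
--             return 0
--     return -((off - goal) // p)
-- ===== Notes on version B (the rewrite author's own statement) =====
-- stated objective: faster
-- what changed: Replaces A's linear search over candidate starts (each re-running the whole doubling loop) by one pass that doubles the affine coefficients of start (value = 2^k*start + 5*(2^k-1)) with early exit, finishing with one ceiling division instead of trying starts one by one.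
-- outside the precondition, e.g. on find_start_iter(0, 3): A returns None, B returns 0; on find_start_iter(7, 0): A raises TypeError, B returns 7
-- crash fix: For goal >= 1 and count <= 0 A raises TypeError (comparing None with an int); B returns goal, the least start reaching goal under zero doubling steps. — e.g. on find_start_iter(7, 0): A raises TypeError, B returns 7
import Mathlib
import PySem

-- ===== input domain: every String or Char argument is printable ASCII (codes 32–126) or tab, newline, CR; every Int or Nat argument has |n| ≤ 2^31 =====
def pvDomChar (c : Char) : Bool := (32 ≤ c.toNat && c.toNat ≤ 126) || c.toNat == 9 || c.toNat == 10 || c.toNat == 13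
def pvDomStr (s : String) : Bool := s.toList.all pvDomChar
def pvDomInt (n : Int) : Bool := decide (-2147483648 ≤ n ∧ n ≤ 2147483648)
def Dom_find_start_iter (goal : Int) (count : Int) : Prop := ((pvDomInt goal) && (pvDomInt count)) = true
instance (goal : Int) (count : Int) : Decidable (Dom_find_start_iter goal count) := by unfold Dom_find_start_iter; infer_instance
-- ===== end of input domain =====

-- B replaces A's linear search over candidate starts by one doubling pass over the
-- affine coefficients of start plus a ceiling division (objective: faster, asymptotic).

-- ===== PORT A =====
-- while count >= 0: start = start*2+5; count -= 1; if count == 0: return start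
-- (falls off with None when count < 1; fuel count.toNat+1 is exactly the number of
--  iterations the Python while loop performs, so the recursion is the same loop)
def feLoop (fuel : Nat) (start : Int) (count : Int) : Option Int :=
  match fuel with
  | 0 => none
  | n+1 =>
    if count ≥ 0 then
      let start' := start * 2 + 5
      let count' := count - 1
      if count' = 0 then some start' else feLoop n start' count'
    else none

def find_end_iter (start : Int) (count : Int) : Option Int :=
  feLoop (count.toNat + 1) start count

-- while goal > value: value = find_end_iter(start, count); if value >= goal: return start
-- else start += 1.  Fuel goal.toNat+1 bounds the iterations (proved below under Pre_);
-- the 0 defaults are the branches where the Python returns None / raises TypeError,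
-- both excluded by Pre_.
def fsLoop (goal : Int) (count : Int) (fuel : Nat) (start : Int) (value : Int) : Int :=
  match fuel with
  | 0 => 0
  | n+1 =>
    if goal > value then
      match find_end_iter start count with
      | some v => if v ≥ goal then start else fsLoop goal count n (start + 1) v
      | none => 0
    else 0

def find_start_iter (goal : Int) (count : Int) : Int :=
  fsLoop goal count (goal.toNat + 1) 0 0

-- ===== PORT B =====
-- for _ in range(count): off = 2*off+5; p *= 2; if off >= goal: return 0
-- then return -((off - goal) // p)
def altLoop (goal : Int) : Nat → Int → Int → Int
  | 0, off, p => -(PySem.Int.floordiv (off - goal) p)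
  | n+1, off, p =>
      let off' := 2 * off + 5
      if off' ≥ goal then 0 else altLoop goal n off' (2 * p)

def find_start_iter_alt (goal : Int) (count : Int) : Int :=
  altLoop goal count.toNat 0 1

-- ===== PRECONDITION & SPEC =====
-- Pre_ excludes goal ≤ 0, where the Python A falls off returning None (no Int value),
-- and count ≤ 0 with goal ≥ 1, where A raises TypeError (None >= goal).
def Pre_find_start_iter (goal : Int) (count : Int) : Prop := 1 ≤ goal ∧ 1 ≤ count
instance (goal : Int) (count : Int) : Decidable (Pre_find_start_iter goal count) := by unfold Pre_find_start_iter; infer_instance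
def pvWitness_find_start_iter : Int × Int := (37, 2)

-- For goal >= 1 and count <= 0 A raises TypeError (comparing None with an int); B returns goal,
-- the least start reaching goal under zero doubling steps.
def Raises_find_start_iter (goal : Int) (count : Int) : Prop := 1 ≤ goal ∧ count ≤ 0
instance (goal : Int) (count : Int) : Decidable (Raises_find_start_iter goal count) := by unfold Raises_find_start_iter; infer_instance
def pvRaiseWitness_find_start_iter : Int × Int := (7, 0)
def pvRaiseWitnessOut_find_start_iter : Int := 7

def Spec_find_start_iter (goal : Int) (count : Int) (out : Int) : Prop := out = find_start_iter_alt goal count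
instance (goal : Int) (count : Int) (out : Int) : Decidable (Spec_find_start_iter goal count out) := by unfold Spec_find_start_iter; infer_instance

-- ===== CLAIM (what is proved, stated in full; the proofs are below) =====
def Claim_equal_find_start_iter : Prop := ∀ (goal : Int) (count : Int), Dom_find_start_iter goal count → Pre_find_start_iter goal count → Spec_find_start_iter goal count (find_start_iter goal count)
def Claim_raises_find_start_iter : Prop := (∀ (goal : Int) (count : Int), Dom_find_start_iter goal count → Raises_find_start_iter goal count → ¬ Pre_find_start_iter goal count) ∧ (Dom_find_start_iter (pvRaiseWitness_find_start_iter.1) (pvRaiseWitness_find_start_iter.2) ∧ Raises_find_start_iter (pvRaiseWitness_find_start_iter.1) (pvRaiseWitness_find_start_iter.2) ∧ find_start_iter_alt (pvRaiseWitness_find_start_iter.1) (pvRaiseWitness_find_start_iter.2) = pvRaiseWitnessOut_find_start_iter)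

-- ===== LEMMAS AND PROOFS =====

-- the offset after k doubling steps from start 0
def offs (k : Nat) : Int := 5 * (2 ^ k - 1)

-- the common answer: least start s ≥ 0 with 2^c * s + offs c ≥ goal (for goal ≥ 1)
def ans (goal : Int) (c : Nat) : Int :=
  if offs c ≥ goal then 0 else -(PySem.Int.floordiv (offs c - goal) (2 ^ c))

lemma offs_succ (k : Nat) : offs (k + 1) = 2 * offs k + 5 := by
  simp [offs, pow_succ]; ring

lemma offs_mono {a b : Nat} (h : a ≤ b) : offs a ≤ offs b := by
  unfold offs
  have : (2:Int) ^ a ≤ 2 ^ b := pow_le_pow_right₀ (by norm_num) h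
  omega

lemma offs_nonneg (k : Nat) : 0 ≤ offs k := by
  have := offs_mono (Nat.zero_le k); simpa [offs] using this

-- ceiling bracket: goal ≤ 2^c * t + offs c  ↔  ans ≤ t, for t ≥ 0
lemma key (goal : Int) (c : Nat) (t : Int) (ht : 0 ≤ t) :
    goal ≤ 2 ^ c * t + offs c ↔ ans goal c ≤ t := by
  have hb : (0:Int) < 2 ^ c := by positivity
  unfold ans
  split_ifs with h
  · constructor
    · intro _; exact ht
    · intro _; nlinarith
  · rw [neg_le, PySem.Int.le_floordiv_iff_mul_le hb]
    constructor
    · intro hg; nlinarith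
    · intro hg; nlinarith

lemma ans_nonneg (goal : Int) (c : Nat) : 0 ≤ ans goal c := by
  have hb : (0:Int) < 2 ^ c := by positivity
  unfold ans
  split_ifs with h
  · exact le_rfl
  · have hfd : PySem.Int.floordiv (offs c - goal) (2 ^ c) < 0 := by
      by_contra hge
      push Not at hge
      have := (PySem.Int.le_floordiv_iff_mul_le hb).1 hge
      simp at this
      omega
    omega

lemma ans_le_goal (goal : Int) (c : Nat) (hg : 1 ≤ goal) (hc : 1 ≤ c) : ans goal c ≤ goal := by
  apply (key goal c goal (by omega)).1
  have h2 : (2:Int) ≤ 2 ^ c := by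
    calc (2:Int) = 2 ^ 1 := by norm_num
    _ ≤ 2 ^ c := pow_le_pow_right₀ (by norm_num) hc
  have h5 := offs_nonneg c
  nlinarith

-- find_end_iter computes the affine closed form for count ≥ 1
lemma feLoop_eq (c : Nat) (hc : 1 ≤ c) (start : Int) :
    feLoop (c + 1) start (c : Int) = some (2 ^ c * start + offs c) := by
  induction c generalizing start with
  | zero => omega
  | succ n ih =>
    by_cases hn : 1 ≤ n
    · rw [feLoop]
      rw [if_pos (by positivity)]
      have h1 : ((n + 1 : Nat) : Int) - 1 = (n : Int) := by push_cast; ring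
      rw [h1]
      rw [if_neg (by exact_mod_cast Nat.one_le_iff_ne_zero.1 hn)]
      rw [ih hn (start * 2 + 5)]
      congr 1
      simp [offs]; ring
    · have hn0 : n = 0 := by omega
      subst hn0
      rw [feLoop]
      norm_num [offs]
      ring

lemma find_end_iter_eq (count : Int) (hc : 1 ≤ count) (start : Int) :
    find_end_iter start count = some (2 ^ count.toNat * start + offs count.toNat) := by
  unfold find_end_iter
  have h : (count.toNat : Int) = count := Int.toNat_of_nonneg (by omega)
  rw [← h]
  exact feLoop_eq count.toNat (by omega) start

-- A's search loop reaches the least start, provided enough fuel remains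
lemma fsLoop_eq (goal count : Int) (hg : 1 ≤ goal) (hc : 1 ≤ count) :
    ∀ (fuel : Nat) (s v : Int), 0 ≤ s → s ≤ ans goal count.toNat → v < goal →
      (ans goal count.toNat - s).toNat < fuel →
      fsLoop goal count fuel s v = ans goal count.toNat := by
  intro fuel
  induction fuel with
  | zero => intro s v _ _ _ hf; omega
  | succ n ih =>
    intro s v hs hsa hv hf
    rw [fsLoop, if_pos (by omega), find_end_iter_eq count hc s]
    set c := count.toNat with hcdef
    show (if 2 ^ c * s + offs c ≥ goal then s else fsLoop goal count n (s + 1) (2 ^ c * s + offs c)) = ans goal c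
    by_cases hge : 2 ^ c * s + offs c ≥ goal
    · rw [if_pos hge]
      have : ans goal c ≤ s := (key goal c s hs).1 hge
      omega
    · rw [if_neg hge]
      have hlt : s < ans goal c := by
        by_contra h
        push Not at h
        exact hge ((key goal c s hs).2 h)
      exact ih (s + 1) _ (by omega) (by omega) (by omega) (by omega)

-- B's doubling loop computes the same answer
lemma altLoop_eq (goal : Int) (hg : 1 ≤ goal) :
    ∀ (m k : Nat), offs k < goal →
      altLoop goal m (offs k) (2 ^ k) = ans goal (k + m) := by
  intro m
  induction m with
  | zero =>
    intro k hk
    rw [altLoop, Nat.add_zero, ans, if_neg (by omega)]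
  | succ n ih =>
    intro k hk
    rw [altLoop]
    simp only [← offs_succ]
    by_cases h : offs (k + 1) ≥ goal
    · rw [if_pos h]
      have := offs_mono (show k + 1 ≤ k + (n + 1) by omega)
      rw [ans, if_pos (by omega)]
    · rw [if_neg h, show (2 : Int) * 2 ^ k = 2 ^ (k + 1) by rw [pow_succ]; ring]
      rw [ih (k + 1) (by omega)]
      congr 1
      omega

-- ===== VERDICT (by name: the statement is the Claim_ definition above) =====
theorem find_start_iter_spec : Claim_equal_find_start_iter := by
  intro goal count _ hpre
  obtain ⟨hg, hc⟩ := hpre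
  have hc1 : 1 ≤ count.toNat := by omega
  unfold Spec_find_start_iter find_start_iter find_start_iter_alt
  have hB : altLoop goal count.toNat 0 1 = ans goal count.toNat := by
    have := altLoop_eq goal hg count.toNat 0 (by simpa [offs] using hg)
    simpa [offs] using this
  rw [hB]
  apply fsLoop_eq goal count hg hc (goal.toNat + 1) 0 0 le_rfl
    (ans_nonneg goal count.toNat) (by omega)
  have := ans_le_goal goal count.toNat hg hc1
  omega

@[simp] theorem find_start_iter_raises : Claim_raises_find_start_iter := by
  unfold Claim_raises_find_start_iter
  exact ⟨by intro goal count _ hr hp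
            unfold Raises_find_start_iter at hr
            unfold Pre_find_start_iter at hp
            omega, by decide⟩
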